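-- pv_equiv track=rewrite | github.com/ofirm57/python-Intro | ex8/nonogram.py | get_intersection_row
-- ===== SOURCE A (Python) =====
-- UNKNOWN = -1
--
-- def make_list_of_index(rows):
--     """function that replicates the list of lists"""
--     lenght = len(rows[0])
--     option_num = len(rows)
--     tmp_lst = []
--     list_of_index = []
--     for i in range(lenght):  # line
--         if i != 0:
--             list_of_index.append(tmp_lst)
--             tmp_lst = []
--         for j in range(option_num):  # row external
--             tmp_lst.append(rows[j][i])
--     list_of_index.append(tmp_lst)
--     return list_of_index
--
-- def get_intersection_row(rows):  # func 2
--     """ recive list of list (option for one row) and return the option for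
--     the row
--     i choose that this func return only what is 100% right"""
--     the_rows = make_list_of_index(rows)
--     result = []
--     for i in range(len(the_rows)):
--         if all(x == the_rows[i][0] for x in the_rows[i]): ###IF ALL THE SAME
--             result.append(the_rows[i][0])
--             continue
--         if 0 in the_rows[i] and (1 or -1) in the_rows[i]:
--             result.append(UNKNOWN)
--             continue
--         result.append(UNKNOWN)
--     return result
-- ===== SOURCE B (Python) =====
-- UNKNOWN = -1
--
-- def get_intersection_row(rows):
--     """Row-by-row fold: maintain the running consensus in acc instead of
--     building a transposed list of columns."""
--     acc = list(rows[0])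
--     for row in rows[1:]:
--         for j in range(len(acc)):
--             if acc[j] != row[j]:
--                 acc[j] = UNKNOWN
--     return acc
-- ===== Notes on version B (the rewrite author's own statement) =====
-- stated objective: alternative
-- what changed: B drops the explicit transpose (make_list_of_index) and the per-column all-equal scan, instead folding row by row over rows[1:] while updating a running consensus accumulator seeded from rows[0] in place; measured constant-factor speedup from not building the column list-of-lists.
import Mathlib
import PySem

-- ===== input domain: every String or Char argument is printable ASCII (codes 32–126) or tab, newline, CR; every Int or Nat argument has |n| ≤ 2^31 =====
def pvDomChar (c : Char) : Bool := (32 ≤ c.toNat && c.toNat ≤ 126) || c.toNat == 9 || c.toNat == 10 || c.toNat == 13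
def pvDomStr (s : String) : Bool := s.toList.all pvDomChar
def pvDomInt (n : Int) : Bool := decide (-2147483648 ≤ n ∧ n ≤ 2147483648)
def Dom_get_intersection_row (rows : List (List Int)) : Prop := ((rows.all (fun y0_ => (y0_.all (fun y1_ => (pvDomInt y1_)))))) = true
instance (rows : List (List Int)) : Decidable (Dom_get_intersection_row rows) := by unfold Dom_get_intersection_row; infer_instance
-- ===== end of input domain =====

-- B replaces A's transpose-then-scan-columns algorithm by a row-by-row fold that maintains the running consensus in place (objective: alternative decomposition).


-- ===== PORT A =====
def UNKNOWN : Int := -1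

def make_list_of_index (rows : List (List Int)) : List (List Int) :=
  let lenght : Int := ((PySem.List.pyGetD rows 0 []).length : Int)
  let option_num : Int := (rows.length : Int)
  let st :=
    (PySem.List.pyRange 0 lenght 1).foldl
      (fun (st : List Int × List (List Int)) i =>
        let st := if i ≠ 0 then (([] : List Int), st.2 ++ [st.1]) else st
        let tmp :=
          (PySem.List.pyRange 0 option_num 1).foldl
            (fun t j => t ++ [PySem.List.pyGetD (PySem.List.pyGetD rows j []) i 0]) st.1
        (tmp, st.2))
      (([] : List Int), ([] : List (List Int)))
  st.2 ++ [st.1]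

def get_intersection_row (rows : List (List Int)) : List Int :=
  let the_rows := make_list_of_index rows
  (PySem.List.pyRange 0 (the_rows.length : Int) 1).foldl
    (fun result i =>
      let row := PySem.List.pyGetD the_rows i []
      if row.all (fun x => x == PySem.List.pyGetD row 0 0) then
        result ++ [PySem.List.pyGetD row 0 0]
      else if ((0 : Int) ∈ row ∧ (1 : Int) ∈ row) then
        result ++ [UNKNOWN]
      else
        result ++ [UNKNOWN])
    []

-- ===== PORT B =====
def get_intersection_row_alt (rows : List (List Int)) : List Int :=
  let acc0 := PySem.List.pyGetD rows 0 []
  (PySem.List.slice rows (some 1) none).foldl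
    (fun acc row =>
      (PySem.List.pyRange 0 (acc.length : Int) 1).foldl
        (fun acc j =>
          if PySem.List.pyGetD acc j 0 ≠ PySem.List.pyGetD row j 0 then
            PySem.List.pySetD acc j UNKNOWN
          else acc)
        acc)
    acc0

-- ===== PRECONDITION & SPEC =====
-- Pre_ excludes exactly the inputs on which A raises IndexError: empty rows, an empty first row,
-- or a row shorter than the first row (A indexes rows[j][i] for every i < len(rows[0])).
def Pre_get_intersection_row (rows : List (List Int)) : Prop :=
  rows ≠ [] ∧ rows.headI ≠ [] ∧ ∀ r ∈ rows, rows.headI.length ≤ r.length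
instance (rows : List (List Int)) : Decidable (Pre_get_intersection_row rows) := by
  unfold Pre_get_intersection_row; infer_instance

def pvWitness_get_intersection_row : List (List Int) := [[0, 1], [0, -1]]

def Spec_get_intersection_row (rows : List (List Int)) (out : List Int) : Prop :=
  out = get_intersection_row_alt rows
instance (rows : List (List Int)) (out : List Int) : Decidable (Spec_get_intersection_row rows out) := by
  unfold Spec_get_intersection_row; infer_instance

-- ===== CLAIM (what is proved, stated in full; the proofs are below) =====
def Claim_equal_get_intersection_row : Prop :=
  ∀ (rows : List (List Int)), Dom_get_intersection_row rows →
    Pre_get_intersection_row rows →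
    Spec_get_intersection_row rows (get_intersection_row rows)

-- ===== LEMMAS AND PROOFS =====

-- the k-th column of rows
def pvCol (rows : List (List Int)) (k : Nat) : List Int := rows.map (fun r => r.getD k 0)

-- the step function of make_list_of_index's outer loop, named for the lemmas below
def pvStepM (rows : List (List Int)) (st : List Int × List (List Int)) (i : Int) :
    List Int × List (List Int) :=
  let st := if i ≠ 0 then (([] : List Int), st.2 ++ [st.1]) else st
  let tmp :=
    (PySem.List.pyRange 0 ((rows.length : Int)) 1).foldl
      (fun t j => t ++ [PySem.List.pyGetD (PySem.List.pyGetD rows j []) i 0]) st.1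
  (tmp, st.2)

-- B's inner loop, structurally: position j of acc compared with row[j]
def pvComb (row : List Int) : Nat → List Int → List Int
  | _, [] => []
  | j, x :: xs => (if x ≠ row.getD j 0 then -1 else x) :: pvComb row (j + 1) xs

lemma pv_mloi_eq_step (rows : List (List Int)) :
    make_list_of_index rows
      = (((PySem.List.pyRange 0 (((PySem.List.pyGetD rows 0 []).length : Int)) 1).foldl
            (pvStepM rows) ([], [])).2
          ++ [((PySem.List.pyRange 0 (((PySem.List.pyGetD rows 0 []).length : Int)) 1).foldl
            (pvStepM rows) ([], [])).1]) := rfl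

lemma pv_inner_col (rows : List (List Int)) (i : Int) (t0 : List Int) :
    (PySem.List.pyRange 0 (rows.length : Int) 1).foldl
      (fun t j => t ++ [PySem.List.pyGetD (PySem.List.pyGetD rows j []) i 0]) t0
    = t0 ++ rows.map (fun r => PySem.List.pyGetD r i 0) := by
  rw [PySem.List.foldl_pyRange_zero_pyGetD' rows [] (fun t r => t ++ [PySem.List.pyGetD r i 0]) t0]
  exact PySem.List.foldl_append_singleton_eq_map ..

lemma pvStepM_ne (rows : List (List Int)) (t : List Int) (L : List (List Int)) (a : Nat)
    (ha : 1 ≤ a) :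
    pvStepM rows (t, L) (a : Int) = (pvCol rows a, L ++ [t]) := by
  unfold pvStepM
  have hne : (a : Int) ≠ 0 := by intro h; omega
  simp only [hne, ne_eq, not_false_iff, ite_true]
  rw [pv_inner_col]
  simp [pvCol]

lemma pvStepM_zero (rows : List (List Int)) (t : List Int) (L : List (List Int)) :
    pvStepM rows (t, L) 0 = (t ++ pvCol rows 0, L) := by
  unfold pvStepM
  simp only [ne_eq, not_true, ite_false]
  rw [pv_inner_col]
  simp [pvCol, PySem.List.pyGetD_zero, List.getD]

lemma pv_mloi_loop (rows : List (List Int)) (k : Nat) :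
    ∀ (a : Nat) (t : List Int) (L : List (List Int)), 1 ≤ a →
      (((PySem.List.pyRange (a : Int) ((a : Int) + (k : Int)) 1).foldl (pvStepM rows) (t, L)).2
        ++ [((PySem.List.pyRange (a : Int) ((a : Int) + (k : Int)) 1).foldl (pvStepM rows) (t, L)).1])
      = L ++ [t] ++ (List.range' a k).map (pvCol rows) := by
  induction k with
  | zero =>
      intro a t L ha
      rw [show PySem.List.pyRange (a : Int) ((a : Int) + ((0 : Nat) : Int)) 1 = []
        from PySem.List.pyRange_one_eq_nil (by push_cast; omega)]
      simp
  | succ k ih =>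
      intro a t L ha
      rw [show PySem.List.pyRange (a : Int) ((a : Int) + ((k + 1 : Nat) : Int)) 1
          = (a : Int) :: PySem.List.pyRange ((a : Int) + 1) ((a : Int) + ((k + 1 : Nat) : Int)) 1
        from PySem.List.pyRange_one_cons (by push_cast; omega)]
      rw [List.foldl_cons, pvStepM_ne rows t L a ha]
      have hcast : ((a : Int) + 1) = ((a + 1 : Nat) : Int) := by push_cast; ring
      have hcast2 : ((a : Int) + ((k + 1 : Nat) : Int)) = ((a + 1 : Nat) : Int) + (k : Int) := by
        push_cast; ring
      rw [hcast2, hcast, ih (a + 1) (pvCol rows a) (L ++ [t]) (by omega)]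
      simp [List.range'_succ]

lemma pv_mloi (rows : List (List Int)) (h : 1 ≤ (PySem.List.pyGetD rows 0 []).length) :
    make_list_of_index rows
      = (List.range (PySem.List.pyGetD rows 0 []).length).map (pvCol rows) := by
  rw [pv_mloi_eq_step]
  set n := (PySem.List.pyGetD rows 0 []).length with hn
  clear_value n
  rw [show PySem.List.pyRange 0 (n : Int) 1
      = (0 : Int) :: PySem.List.pyRange 1 (n : Int) 1
    from PySem.List.pyRange_one_cons (by omega)]
  rw [List.foldl_cons, pvStepM_zero rows [] []]
  have hl := pv_mloi_loop rows (n - 1) 1 (pvCol rows 0) [] (le_refl 1)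
  norm_num at hl
  have hb : (n : Int) = 1 + (((n - 1 : Nat)) : Int) := by omega
  rw [List.nil_append, hb, hl]
  have : List.range n = 0 :: List.range' 1 (n - 1) := by
    rw [List.range_eq_range']
    cases n with
    | zero => omega
    | succ m => simp [List.range'_succ]
  rw [this]
  simp

lemma pv_A (r0 : List Int) (rest : List (List Int)) (h : r0 ≠ []) :
    get_intersection_row (r0 :: rest)
      = (List.range r0.length).map (fun k =>
          if (rest.all (fun r => r.getD k 0 == r0.getD k 0)) then r0.getD k 0 else -1) := by
  have h0 : PySem.List.pyGetD (r0 :: rest) 0 [] = r0 := PySem.List.pyGetD_zero_cons ..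
  have hn : 1 ≤ (PySem.List.pyGetD (r0 :: rest) 0 []).length := by
    rw [h0]; exact List.length_pos_of_ne_nil h
  show (PySem.List.pyRange 0 ((make_list_of_index (r0 :: rest)).length : Int) 1).foldl
      (fun result i =>
        let row := PySem.List.pyGetD (make_list_of_index (r0 :: rest)) i []
        if row.all (fun x => x == PySem.List.pyGetD row 0 0) then
          result ++ [PySem.List.pyGetD row 0 0]
        else if ((0 : Int) ∈ row ∧ (1 : Int) ∈ row) then
          result ++ [UNKNOWN]
        else
          result ++ [UNKNOWN]) [] = _
  rw [PySem.List.foldl_pyRange_zero_pyGetD' (make_list_of_index (r0 :: rest)) []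
    (fun result row =>
      if row.all (fun x => x == PySem.List.pyGetD row 0 0) then
        result ++ [PySem.List.pyGetD row 0 0]
      else if ((0 : Int) ∈ row ∧ (1 : Int) ∈ row) then
        result ++ [UNKNOWN]
      else
        result ++ [UNKNOWN]) []]
  have hstep : (fun (result : List Int) (row : List Int) =>
      if row.all (fun x => x == PySem.List.pyGetD row 0 0) then
        result ++ [PySem.List.pyGetD row 0 0]
      else if ((0 : Int) ∈ row ∧ (1 : Int) ∈ row) then
        result ++ [UNKNOWN]
      else
        result ++ [UNKNOWN])
      = (fun result row => result ++
          [if row.all (fun x => x == PySem.List.pyGetD row 0 0) then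
            PySem.List.pyGetD row 0 0 else UNKNOWN]) := by
    funext result row
    by_cases hc : row.all (fun x => x == PySem.List.pyGetD row 0 0)
    · simp [hc]
    · simp [hc]
  rw [hstep, PySem.List.foldl_append_singleton_eq_map, pv_mloi _ hn, h0, List.nil_append,
    List.map_map]
  apply List.map_congr_left
  intro k hk
  simp only [Function.comp_apply, pvCol, List.map_cons, PySem.List.pyGetD_zero_cons,
    List.all_cons, List.all_map, beq_self_eq_true, Bool.true_and, UNKNOWN]
  rfl

lemma pv_inner_loop (row : List Int) :
    ∀ (suffix pre : List Int),
      (PySem.List.pyRange (pre.length : Int) ((pre.length : Int) + (suffix.length : Int)) 1).foldl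
        (fun acc j =>
          if PySem.List.pyGetD acc j 0 ≠ PySem.List.pyGetD row j 0 then
            PySem.List.pySetD acc j UNKNOWN
          else acc)
        (pre ++ suffix)
      = pre ++ pvComb row pre.length suffix := by
  intro suffix
  induction suffix with
  | nil =>
      intro pre
      rw [show PySem.List.pyRange (pre.length : Int)
            ((pre.length : Int) + (([] : List Int).length : Int)) 1 = []
        from PySem.List.pyRange_one_eq_nil (by simp)]
      simp [pvComb]
  | cons x xs ih =>
      intro pre
      rw [show PySem.List.pyRange (pre.length : Int)
            ((pre.length : Int) + ((x :: xs).length : Int)) 1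
          = (pre.length : Int)
            :: PySem.List.pyRange ((pre.length : Int) + 1)
                ((pre.length : Int) + ((x :: xs).length : Int)) 1
        from PySem.List.pyRange_one_cons (by simp)]
      rw [List.foldl_cons]
      have hget : PySem.List.pyGetD (pre ++ x :: xs) (pre.length : Int) 0 = x := by
        simp [List.getD_eq_getElem?_getD]
      have hgetr : PySem.List.pyGetD row (pre.length : Int) 0 = row.getD pre.length 0 := by
        simp
      have hset : PySem.List.pySetD (pre ++ x :: xs) (pre.length : Int) UNKNOWN
          = pre ++ (-1) :: xs := by
        simp [UNKNOWN]
      have hstep :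
          (if PySem.List.pyGetD (pre ++ x :: xs) (pre.length : Int) 0
              ≠ PySem.List.pyGetD row (pre.length : Int) 0 then
            PySem.List.pySetD (pre ++ x :: xs) (pre.length : Int) UNKNOWN
          else pre ++ x :: xs)
          = (pre ++ [if x ≠ row.getD pre.length 0 then -1 else x]) ++ xs := by
        rw [hget, hgetr, hset]
        by_cases hc : x = row.getD pre.length 0
        · rw [if_neg (by simp [hc]), if_neg (by simp [hc])]
          simp
        · rw [if_pos hc, if_pos hc]
          simp
      rw [hstep]
      have hlen : ((pre ++ [if x ≠ row.getD pre.length 0 then -1 else x]).length : Int)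
          = (pre.length : Int) + 1 := by simp
      have hlen2 : ((pre.length : Int) + ((x :: xs).length : Int))
          = ((pre ++ [if x ≠ row.getD pre.length 0 then -1 else x]).length : Int)
            + (xs.length : Int) := by simp; ring
      rw [hlen2, show (pre.length : Int) + 1
          = ((pre ++ [if x ≠ row.getD pre.length 0 then -1 else x]).length : Int) from hlen.symm]
      rw [ih (pre ++ [if x ≠ row.getD pre.length 0 then -1 else x])]
      simp [pvComb]

lemma pv_comb_map (row : List Int) :
    ∀ (m j : Nat) (f : Nat → Int),
      pvComb row j ((List.range' j m).map f)
        = (List.range' j m).map (fun k => if f k ≠ row.getD k 0 then -1 else f k) := by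
  intro m
  induction m with
  | zero => intro j f; simp [pvComb]
  | succ m ih =>
      intro j f
      rw [List.range'_succ, List.map_cons, List.map_cons]
      show pvComb row j (f j :: _) = _
      rw [pvComb, ih (j + 1) f]

lemma pv_fold_comb :
    ∀ (rest : List (List Int)) (n : Nat) (f : Nat → Int),
      rest.foldl (fun acc row => pvComb row 0 acc) ((List.range n).map f)
        = (List.range n).map
            (fun k => if rest.all (fun r => r.getD k 0 == f k) then f k else -1) := by
  intro rest
  induction rest with
  | nil => intro n f; simp
  | cons row rest ih =>
      intro n f
      rw [List.foldl_cons]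
      rw [show (List.range n) = List.range' 0 n from List.range_eq_range' ..]
      rw [pv_comb_map row n 0 f]
      rw [show (List.range' 0 n) = List.range n from (List.range_eq_range' ..).symm]
      rw [ih n (fun k => if f k ≠ row.getD k 0 then -1 else f k)]
      apply List.map_congr_left
      intro k hk
      by_cases hc : row.getD k 0 = f k
      · have hc' : (row.getD k 0 == f k) = true := by simpa using hc
        have h1 : (if f k ≠ row.getD k 0 then (-1 : Int) else f k) = f k := if_neg (fun h => h hc.symm)
        rw [List.all_cons, hc', Bool.true_and, h1]
      · have hc' : (row.getD k 0 == f k) = false := by simpa using hc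
        have h1 : (if f k ≠ row.getD k 0 then (-1 : Int) else f k) = -1 :=
          if_pos (Ne.symm hc)
        rw [List.all_cons, hc', Bool.false_and, h1]
        simp

lemma pv_map_range_getD (xs : List Int) :
    (List.range xs.length).map (fun k => xs.getD k 0) = xs := by
  apply List.ext_getElem
  · simp
  · intro i h1 h2
    simp [List.getD_eq_getElem?_getD, List.getElem?_eq_getElem h2]

lemma pv_B (r0 : List Int) (rest : List (List Int)) :
    get_intersection_row_alt (r0 :: rest)
      = (List.range r0.length).map (fun k =>
          if (rest.all (fun r => r.getD k 0 == r0.getD k 0)) then r0.getD k 0 else -1) := by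
  show (PySem.List.slice (r0 :: rest) (some 1) none).foldl _ (PySem.List.pyGetD (r0 :: rest) 0 []) = _
  rw [PySem.List.slice_from_one, PySem.List.pyGetD_zero_cons]
  have hF : (fun (acc : List Int) (row : List Int) =>
      (PySem.List.pyRange 0 (acc.length : Int) 1).foldl
        (fun acc j =>
          if PySem.List.pyGetD acc j 0 ≠ PySem.List.pyGetD row j 0 then
            PySem.List.pySetD acc j UNKNOWN
          else acc)
        acc)
      = (fun acc row => pvComb row 0 acc) := by
    funext acc row
    have := pv_inner_loop row acc []
    simpa using this
  rw [hF]
  show rest.foldl (fun acc row => pvComb row 0 acc) r0 = _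
  rw [← pv_map_range_getD r0, pv_fold_comb rest r0.length (fun k => r0.getD k 0)]
  rw [pv_map_range_getD r0]

-- ===== VERDICT (by name: the statement is the Claim_ definition above) =====
theorem get_intersection_row_spec : Claim_equal_get_intersection_row := by
  intro rows _ hpre
  obtain ⟨h1, h2, _⟩ := hpre
  cases rows with
  | nil => exact absurd rfl h1
  | cons r0 rest =>
      have h0 : r0 ≠ [] := by simpa using h2
      unfold Spec_get_intersection_row
      rw [pv_A r0 rest h0, pv_B r0 rest]
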